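-- pv_equiv track=rewrite | github.com/hlarsonhlarson/Basalt_test | list_branches_module/package_manager.py | group_by_arch_field
-- ===== SOURCE A (Python) =====
-- def group_by_arch_field(branch_list):
-- 	groups = dict()
-- 	packages_info = dict()
-- 	for elem in branch_list:
-- 		version = elem['arch']
-- 		if version not in groups:
-- 			groups[version] = []
-- 		groups[version].append(elem['name'])
-- 		packages_info[f"{version}_{elem['name']}"] = elem
-- 	return groups, packages_info
-- ===== SOURCE B (Python) =====
-- def group_by_arch_field(branch_list):
--     arches = list(dict.fromkeys(elem['arch'] for elem in branch_list))
--     groups = {a: [elem['name'] for elem in branch_list if elem['arch'] == a]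
--               for a in arches}
--     packages_info = {f"{elem['arch']}_{elem['name']}": elem for elem in branch_list}
--     return groups, packages_info
-- ===== Notes on version B (the rewrite author's own statement) =====
-- stated objective: alternative
-- what changed: Replaces A's single-pass mutating hash accumulation with a declarative decomposition: collect the distinct arch values once (dict.fromkeys), build each arch's name list by its own filtering scan of the input, and build packages_info with a separate dict comprehension.
import Mathlib
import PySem

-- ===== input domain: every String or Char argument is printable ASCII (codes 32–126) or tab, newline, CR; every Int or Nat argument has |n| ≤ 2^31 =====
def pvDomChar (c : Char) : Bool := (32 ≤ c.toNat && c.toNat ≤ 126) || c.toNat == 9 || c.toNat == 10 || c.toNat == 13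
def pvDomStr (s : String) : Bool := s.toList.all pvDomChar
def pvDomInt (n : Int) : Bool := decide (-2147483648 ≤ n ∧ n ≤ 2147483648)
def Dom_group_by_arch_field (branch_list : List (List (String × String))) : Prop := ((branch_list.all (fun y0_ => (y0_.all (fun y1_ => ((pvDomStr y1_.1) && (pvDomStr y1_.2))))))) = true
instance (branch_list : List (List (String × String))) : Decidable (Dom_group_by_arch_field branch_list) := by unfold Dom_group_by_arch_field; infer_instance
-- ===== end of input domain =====

-- B groups by scanning the list once per distinct arch (dict.fromkeys + comprehensions)
-- instead of A's single-pass hash accumulation; objective: alternative decomposition, not speed.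

-- elem[key] for a string-keyed dict represented as an assoc list (first match);
-- total with default "" — Pre_ guarantees the key is present wherever Python A indexes.
def pvDget (e : List (String × String)) (key : String) : String :=
  (((e.find? (fun p => p.1 == key)).map (·.2)).getD "")

-- ===== PORT A =====
def group_by_arch_field (branch_list : List (List (String × String))) : (List (String × List String)) × (List (String × List (String × String))) :=
  let st := branch_list.foldl
    (fun (st : PySem.Dict String (List String) × PySem.Dict String (List (String × String))) elem =>
      let version := pvDget elem "arch"
      let groups := if st.1.contains version then st.1 else st.1.insert version []
      let groups := groups.modify version [] (fun l => l ++ [pvDget elem "name"])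
      let packages_info := st.2.insert (version ++ "_" ++ pvDget elem "name") elem
      (groups, packages_info))
    (PySem.Dict.empty, PySem.Dict.empty)
  (st.1.items, st.2.items)

-- ===== PORT B =====
def group_by_arch_field_alt (branch_list : List (List (String × String))) : (List (String × List String)) × (List (String × List (String × String))) :=
  let arches := PySem.List.dedup (branch_list.map (fun elem => pvDget elem "arch"))
  let groups := arches.map (fun a =>
    (a, (branch_list.filter (fun elem => pvDget elem "arch" == a)).map (fun elem => pvDget elem "name")))
  let packages_info := branch_list.foldl
    (fun (d : PySem.Dict String (List (String × String))) elem =>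
      d.insert (pvDget elem "arch" ++ "_" ++ pvDget elem "name") elem)
    PySem.Dict.empty
  (groups, packages_info.items)

-- ===== PRECONDITION & SPEC =====
-- Pre_ excludes only inputs where Python A raises KeyError: some elem lacks key 'arch' or 'name'.
def Pre_group_by_arch_field (branch_list : List (List (String × String))) : Prop :=
  (branch_list.all (fun e => e.any (fun p => p.1 == "arch") && e.any (fun p => p.1 == "name"))) = true
instance (branch_list : List (List (String × String))) : Decidable (Pre_group_by_arch_field branch_list) := by unfold Pre_group_by_arch_field; infer_instance
def pvWitness_group_by_arch_field : (List (List (String × String))) :=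
  [[("arch", "x86"), ("name", "pkgA")], [("arch", "arm"), ("name", "pkgB")], [("arch", "x86"), ("name", "pkgC")]]

def Spec_group_by_arch_field (branch_list : List (List (String × String))) (out : (List (String × List String)) × (List (String × List (String × String)))) : Prop := out = group_by_arch_field_alt branch_list
instance (branch_list : List (List (String × String))) (out : (List (String × List String)) × (List (String × List (String × String)))) : Decidable (Spec_group_by_arch_field branch_list out) := by unfold Spec_group_by_arch_field; infer_instance

-- ===== CLAIM (what is proved, stated in full; the proofs are below) =====
def Claim_equal_group_by_arch_field : Prop := ∀ (branch_list : List (List (String × String))), Dom_group_by_arch_field branch_list → Pre_group_by_arch_field branch_list → Spec_group_by_arch_field branch_list (group_by_arch_field branch_list)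

-- ===== LEMMAS AND PROOFS =====

-- A's in-place pair-state loop splits into two independent folds.
theorem pvFoldl_pair {α β γ : Type} (l : List γ) (g : α → γ → α) (h : β → γ → β) (x : α) (y : β) :
    l.foldl (fun st e => (g st.1 e, h st.2 e)) (x, y) = (l.foldl g x, l.foldl h y) := by
  induction l generalizing x y with
  | nil => rfl
  | cons e t ih => simp [List.foldl, ih]

-- A's "if absent, insert []; then append" step is exactly Dict.modify.
theorem pvStep_eq_modify (d : PySem.Dict String (List String)) (a : String) (n : String) :
    (if d.contains a then d else d.insert a []).modify a [] (fun l => l ++ [n])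
      = d.modify a [] (fun l => l ++ [n]) := by
  by_cases h : d.contains a
  · simp [h]
  · simp only [h, if_neg, Bool.false_eq_true, not_false_eq_true]
    simp only [PySem.Dict.modify]
    rw [PySem.Dict.getD_insert_self, PySem.Dict.insert_insert_self,
        PySem.Dict.getD_of_not_contains _ _ (by simpa using h)]

-- Characterisation of A's groups fold as a plain modify fold.
theorem pvGroupsFold_eq (branch_list : List (List (String × String))) :
    branch_list.foldl
      (fun (d : PySem.Dict String (List String)) elem =>
        (if d.contains (pvDget elem "arch") then d else d.insert (pvDget elem "arch") []).modify
          (pvDget elem "arch") [] (fun l => l ++ [pvDget elem "name"]))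
      PySem.Dict.empty
    = branch_list.foldl
      (fun (d : PySem.Dict String (List String)) elem =>
        d.modify (pvDget elem "arch") [] (fun l => l ++ [pvDget elem "name"]))
      PySem.Dict.empty := by
  exact PySem.List.foldl_congr_mem _ _ _ _
    (fun d elem _ => pvStep_eq_modify d (pvDget elem "arch") (pvDget elem "name"))

theorem pvGroups_items (branch_list : List (List (String × String))) :
    (branch_list.foldl
      (fun (d : PySem.Dict String (List String)) elem =>
        d.modify (pvDget elem "arch") [] (fun l => l ++ [pvDget elem "name"]))
      PySem.Dict.empty).items
    = (PySem.List.dedup (branch_list.map (fun elem => pvDget elem "arch"))).map (fun a =>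
        (a, (branch_list.filter (fun elem => pvDget elem "arch" == a)).map (fun elem => pvDget elem "name"))) := by
  set d := branch_list.foldl
      (fun (d : PySem.Dict String (List String)) elem =>
        d.modify (pvDget elem "arch") [] (fun l => l ++ [pvDget elem "name"]))
      PySem.Dict.empty with hd
  have hkeys : d.keys = PySem.Set.ofList (branch_list.map (fun elem => pvDget elem "arch")) := by
    rw [hd, PySem.Dict.keys_foldl_modify_key branch_list (fun e => pvDget e "arch") []
      (fun _ e => (fun l => l ++ [pvDget e "name"]))]
    simp [PySem.Dict.keys_empty, PySem.Set.update, PySem.Set.ofList]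
  have hnodup : d.keys.Nodup := by
    rw [hd]
    exact PySem.Dict.nodup_keys_foldl_modify_key branch_list (fun e => pvDget e "arch") []
      (fun _ e => (fun l => l ++ [pvDget e "name"])) _ PySem.Dict.nodup_keys_empty
  have hgetD : ∀ c, d.getD c [] = (branch_list.filter (fun elem => pvDget elem "arch" == c)).map (fun elem => pvDget elem "name") := by
    intro c
    have hmap : branch_list.foldl
        (fun (d : PySem.Dict String (List String)) elem =>
          d.modify (pvDget elem "arch") [] (fun l => l ++ [pvDget elem "name"]))
        PySem.Dict.empty
      = (branch_list.map (fun e => (pvDget e "arch", pvDget e "name"))).foldl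
        (fun (d : PySem.Dict String (List String)) p => d.modify p.1 [] (fun l => l ++ [p.2]))
        PySem.Dict.empty := by
      rw [List.foldl_map]
    rw [hd, hmap, PySem.Dict.getD_foldl_modify_append]
    simp [PySem.Dict.getD_empty, List.filter_map, List.map_map, Function.comp_def]
  rw [PySem.Dict.items_eq_map_keys d hnodup [], hkeys, PySem.List.dedup_eq_ofList]
  exact List.map_congr_left (fun a _ => by rw [hgetD a])

-- ===== VERDICT (by name: the statement is the Claim_ definition above) =====
theorem group_by_arch_field_spec : Claim_equal_group_by_arch_field := by
  intro branch_list _ _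
  show ((branch_list.foldl
      (fun (st : PySem.Dict String (List String) × PySem.Dict String (List (String × String))) elem =>
        ((if st.1.contains (pvDget elem "arch") then st.1 else st.1.insert (pvDget elem "arch") []).modify
            (pvDget elem "arch") [] (fun l => l ++ [pvDget elem "name"]),
         st.2.insert (pvDget elem "arch" ++ "_" ++ pvDget elem "name") elem))
      (PySem.Dict.empty, PySem.Dict.empty)).1.items,
    (branch_list.foldl
      (fun (st : PySem.Dict String (List String) × PySem.Dict String (List (String × String))) elem =>
        ((if st.1.contains (pvDget elem "arch") then st.1 else st.1.insert (pvDget elem "arch") []).modify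
            (pvDget elem "arch") [] (fun l => l ++ [pvDget elem "name"]),
         st.2.insert (pvDget elem "arch" ++ "_" ++ pvDget elem "name") elem))
      (PySem.Dict.empty, PySem.Dict.empty)).2.items)
    = group_by_arch_field_alt branch_list
  rw [pvFoldl_pair branch_list
    (fun (d : PySem.Dict String (List String)) elem =>
      (if d.contains (pvDget elem "arch") then d else d.insert (pvDget elem "arch") []).modify
        (pvDget elem "arch") [] (fun l => l ++ [pvDget elem "name"]))
    (fun (d : PySem.Dict String (List (String × String))) elem =>
      d.insert (pvDget elem "arch" ++ "_" ++ pvDget elem "name") elem)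
    PySem.Dict.empty PySem.Dict.empty]
  refine Prod.ext ?_ rfl
  show (_ : PySem.Dict String (List String)).items = _
  rw [pvGroupsFold_eq, pvGroups_items]
  rfl
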